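-- pv_equiv track=rewrite | github.com/WK-Tseng/LeetCode | 2000_2999/2321_H_Maximum Score Of Spliced Array.py | maximumsSplicedArray
-- ===== SOURCE A (Python) =====
-- from typing import List
--
-- def maximumsSplicedArray(nums1: List[int], nums2: List[int]) -> int:
--     def kadane(nums):
--         max_result, max_so_far = nums[0], nums[0]
--         for num in nums[1:]:
--             max_so_far = max(num, max_so_far + num)
--             max_result = max(max_result, max_so_far)
--         return max_result
--
--     result1 = sum(nums1) + kadane([n2-n1 for n1, n2 in zip(nums1, nums2)])
--     result2 = sum(nums2) + kadane([n2-n1 for n1, n2 in zip(nums2, nums1)])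
--     return max(result1, result2)
-- ===== SOURCE B (Python) =====
-- from typing import List
--
-- def maximumsSplicedArray(nums1: List[int], nums2: List[int]) -> int:
--     # Prefix-sum formulation: the best nonempty subarray gain/loss of the
--     # difference stream is max/min over j of P[j] - (min/max prefix before j).
--     s1, s2 = sum(nums1), sum(nums2)
--     p = lo = hi = 0                      # running prefix sum; min/max of earlier prefixes
--     gain = loss = nums2[0] - nums1[0]    # best nonempty gain / loss so far
--     for a, b in zip(nums1, nums2):
--         p += b - a
--         gain = max(gain, p - lo)
--         loss = min(loss, p - hi)
--         lo = min(lo, p)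
--         hi = max(hi, p)
--     return max(s1 + gain, s2 - loss)
-- ===== Notes on version B (the rewrite author's own statement) =====
-- stated objective: alternative
-- what changed: Replaces the two difference arrays and two Kadane dynamic-programming passes by one prefix-sum pass over the pairs: it keeps the running prefix sum of the differences together with the min and max prefix seen earlier, so the best swap gain/loss are max_j(P[j]-minPrefix) and min_j(P[j]-maxPrefix); returns max(sum1+gain, sum2-loss).
import Mathlib
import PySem

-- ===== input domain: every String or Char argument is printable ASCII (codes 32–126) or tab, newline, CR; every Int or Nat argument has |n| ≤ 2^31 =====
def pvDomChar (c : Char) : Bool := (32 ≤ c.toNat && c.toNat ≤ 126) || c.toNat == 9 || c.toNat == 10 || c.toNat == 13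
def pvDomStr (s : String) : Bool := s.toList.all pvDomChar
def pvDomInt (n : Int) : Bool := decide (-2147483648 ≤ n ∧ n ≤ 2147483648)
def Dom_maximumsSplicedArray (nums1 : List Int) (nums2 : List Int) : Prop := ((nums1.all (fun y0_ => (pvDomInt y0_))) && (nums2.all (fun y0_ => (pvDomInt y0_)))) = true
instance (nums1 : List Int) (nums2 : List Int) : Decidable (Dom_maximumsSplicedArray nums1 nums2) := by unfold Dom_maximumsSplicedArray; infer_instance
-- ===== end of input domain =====

-- B replaces A's two difference arrays and two Kadane DP passes by one prefix-sum pass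
-- tracking the running prefix sum and the min/max earlier prefix (alternative algorithm).

-- ===== PORT A =====
-- one step of A's kadane loop: state (max_result, max_so_far)
def pvStepA (st : Int × Int) (num : Int) : Int × Int :=
  let s := max num (st.2 + num)
  (max st.1 s, s)

-- A's inner kadane; [] => 0 is unreachable under Pre_ (Python raises IndexError there)
def pvKadane (nums : List Int) : Int :=
  match nums with
  | [] => 0
  | h :: t => (t.foldl pvStepA (h, h)).1

def maximumsSplicedArray (nums1 : List Int) (nums2 : List Int) : Int :=
  let result1 := nums1.sum + pvKadane (List.zipWith (fun n1 n2 => n2 - n1) nums1 nums2)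
  let result2 := nums2.sum + pvKadane (List.zipWith (fun n1 n2 => n2 - n1) nums2 nums1)
  max result1 result2

-- ===== PORT B =====
-- one step of B's prefix-sum loop on the difference d = b - a:
-- state (p, lo, hi, gain, loss) exactly as in Source B's loop body
def pvStepP (st : Int × Int × Int × Int × Int) (d : Int) : Int × Int × Int × Int × Int :=
  let p := st.1 + d
  let gain := max st.2.2.2.1 (p - st.2.1)
  let loss := min st.2.2.2.2 (p - st.2.2.1)
  (p, min st.2.1 p, max st.2.2.1 p, gain, loss)

def maximumsSplicedArray_alt (nums1 : List Int) (nums2 : List Int) : Int :=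
  match nums1, nums2 with
  | a :: _, b :: _ =>
    let g0 := b - a
    let st := (List.zip nums1 nums2).foldl (fun st ab => pvStepP st (ab.2 - ab.1)) (0, 0, 0, g0, g0)
    max (nums1.sum + st.2.2.2.1) (nums2.sum - st.2.2.2.2)
  | _, _ => 0   -- unreachable under Pre_ (nums1[0]/nums2[0] raise in Python)

-- ===== PRECONDITION & SPEC =====
-- Pre_ excludes exactly the inputs where Python A raises IndexError: an empty nums1 or
-- nums2 (the diff list is empty and nums[0] fails; B raises there too, at nums2[0]).
def Pre_maximumsSplicedArray (nums1 : List Int) (nums2 : List Int) : Prop :=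
  nums1 ≠ [] ∧ nums2 ≠ []
instance (nums1 : List Int) (nums2 : List Int) : Decidable (Pre_maximumsSplicedArray nums1 nums2) := by
  unfold Pre_maximumsSplicedArray; infer_instance

def pvWitness_maximumsSplicedArray : List Int × List Int := ([60, -60, 25], [10, 90, 1])

def Spec_maximumsSplicedArray (nums1 : List Int) (nums2 : List Int) (out : Int) : Prop := out = maximumsSplicedArray_alt nums1 nums2
instance (nums1 : List Int) (nums2 : List Int) (out : Int) : Decidable (Spec_maximumsSplicedArray nums1 nums2 out) := by unfold Spec_maximumsSplicedArray; infer_instance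

-- ===== CLAIM (what is proved, stated in full; the proofs are below) =====
def Claim_equal_maximumsSplicedArray : Prop := ∀ (nums1 : List Int) (nums2 : List Int), Dom_maximumsSplicedArray nums1 nums2 → Pre_maximumsSplicedArray nums1 nums2 → Spec_maximumsSplicedArray nums1 nums2 (maximumsSplicedArray nums1 nums2)

-- ===== LEMMAS AND PROOFS =====

-- min-Kadane step, the abstract counterpart of the loss side of B's pass
def pvStepMin (st : Int × Int) (num : Int) : Int × Int :=
  let s := min num (st.2 + num)
  (min st.1 s, s)

-- B's fold over the zipped pairs only looks at b - a, so it is the fold over the diff list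
theorem pv_zip_fold (l1 l2 : List Int) {σ : Type} (f : σ → Int → σ) :
    ∀ s : σ, (List.zip l1 l2).foldl (fun st ab => f st (ab.2 - ab.1)) s
      = (List.zipWith (fun a b => b - a) l1 l2).foldl f s := by
  induction l1 generalizing l2 with
  | nil => intro s; cases l2 <;> rfl
  | cons a t ih => intro s; cases l2 with
    | nil => rfl
    | cons b t2 => simpa using ih t2 _

-- the second diff list of A is the pointwise negation of the first
theorem pv_zip_swap (l1 l2 : List Int) :
    List.zipWith (fun n1 n2 => n2 - n1) l2 l1
      = (List.zipWith (fun n1 n2 => n2 - n1) l1 l2).map (fun x => -x) := by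
  induction l1 generalizing l2 with
  | nil => cases l2 <;> simp
  | cons a t ih => cases l2 <;> simp [ih]

-- invariant: if lo = p - max ms 0 and hi = p - min ns 0, the gain/loss components of B's
-- prefix fold are the results of the max- and min-Kadane folds
theorem pv_prefix_inv (t : List Int) :
    ∀ p mr ms nr ns : Int,
      (t.foldl pvStepP (p, p - max ms 0, p - min ns 0, mr, nr)).2.2.2.1
          = (t.foldl pvStepA (mr, ms)).1
      ∧ (t.foldl pvStepP (p, p - max ms 0, p - min ns 0, mr, nr)).2.2.2.2
          = (t.foldl pvStepMin (nr, ns)).1 := by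
  induction t with
  | nil => intro p mr ms nr ns; exact ⟨rfl, rfl⟩
  | cons d t ih =>
      intro p mr ms nr ns
      simp only [List.foldl_cons, pvStepP, pvStepA, pvStepMin]
      have hlo : min (p - max ms 0) (p + d) = (p + d) - max (max d (ms + d)) 0 := by omega
      have hhi : max (p - min ns 0) (p + d) = (p + d) - min (min d (ns + d)) 0 := by omega
      have hg : max mr (p + d - (p - max ms 0)) = max mr (max d (ms + d)) := by omega
      have hl : min nr (p + d - (p - min ns 0)) = min nr (min d (ns + d)) := by omega
      rw [hlo, hhi, hg, hl]
      exact ih (p + d) _ _ _ _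

-- the min-Kadane fold is minus the max-Kadane fold on the negated list
theorem pv_min_neg (t : List Int) :
    ∀ nr ns : Int,
      (t.foldl pvStepMin (nr, ns)).1 = -((t.map (fun x => -x)).foldl pvStepA (-nr, -ns)).1 := by
  induction t with
  | nil => intro nr ns; simp
  | cons d t ih =>
      intro nr ns
      simp only [List.map_cons, List.foldl_cons, pvStepA, pvStepMin]
      have h1 : max (-d) (-ns + -d) = -(min d (ns + d)) := by omega
      have h2 : max (-nr) (-(min d (ns + d))) = -(min nr (min d (ns + d))) := by omega
      rw [h1, h2, ← ih]

-- ===== VERDICT (by name: the statement is the Claim_ definition above) =====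
theorem maximumsSplicedArray_spec : Claim_equal_maximumsSplicedArray := by
  intro nums1 nums2 _ hpre
  obtain ⟨h1, h2⟩ := hpre
  obtain ⟨a, t1, rfl⟩ := List.exists_cons_of_ne_nil h1
  obtain ⟨b, t2, rfl⟩ := List.exists_cons_of_ne_nil h2
  unfold Spec_maximumsSplicedArray maximumsSplicedArray maximumsSplicedArray_alt
  dsimp only
  rw [pv_zip_swap (a :: t1) (b :: t2)]
  rw [pv_zip_fold (a :: t1) (b :: t2) pvStepP]
  simp only [List.zipWith_cons_cons, List.map_cons, List.foldl_cons]
  simp only [pvKadane]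
  -- evaluate B's first loop step from the initial state (0,0,0,d0,d0)
  have hstep : pvStepP (0, 0, 0, b - a, b - a) (b - a)
      = (b - a, (b - a) - max (b - a) 0, (b - a) - min (b - a) 0, b - a, b - a) := by
    simp only [pvStepP, Prod.mk.injEq]
    omega
  rw [hstep]
  obtain ⟨hg, hl⟩ := pv_prefix_inv (List.zipWith (fun a b => b - a) t1 t2)
    (b - a) (b - a) (b - a) (b - a) (b - a)
  have hz : (List.zipWith (fun a b => b - a) t1 t2)
      = (List.zipWith (fun n1 n2 => n2 - n1) t1 t2) := rfl
  rw [hz] at hg hl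
  rw [hg, hl, pv_min_neg]
  have : -(b - a) = a - b := by ring
  rw [this]
  omega
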